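-- pv_equiv track=rewrite | github.com/pravinva/unified-ot-zerobus-connector | ot_simulator/vendor_modes/kepware.py | _get_device_from_sensor
-- ===== SOURCE A (Python) =====
-- def _get_device_from_sensor(sensor_name: str) -> str:
--     """Extract device name from sensor name.
--
--     Example: crusher_1_motor_power -> Crusher_01
--     """
--     parts = sensor_name.split("_")
--
--     # Find equipment identifier (e.g., crusher_1, conveyor_01)
--     equipment = []
--     for i, part in enumerate(parts):
--         if i == 0:
--             equipment.append(part.capitalize())
--         elif part.isdigit():
--             equipment.append(f"{int(part):02d}")
--             break
--         else:
--             equipment.append(part.capitalize())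
--
--     return "_".join(equipment) if equipment else "Device_01"
-- ===== SOURCE B (Python) =====
-- def _get_device_from_sensor(sensor_name: str) -> str:
--     """Extract device name from sensor name.
--
--     Example: crusher_1_motor_power -> Crusher_01
--     """
--     out = []
--     tok = ""
--     idx = 0
--     for ch in sensor_name + "_":  # sentinel underscore flushes the last token
--         if ch == "_":
--             if idx > 0 and tok.isdigit():
--                 out.append(f"{int(tok):02d}")
--                 return "_".join(out)
--             out.append(tok.capitalize())
--             tok = ""
--             idx += 1
--         else:
--             tok += ch
--     return "_".join(out)
-- ===== Notes on version B (the rewrite author's own statement) =====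
-- stated objective: alternative
-- what changed: B never calls split: it streams over the characters with a token buffer and an index counter, flushing each token at an underscore (sentinel-terminated) and returning early when a flushed token past the first is all digits, whereas A first materialises the part list and then loops over it with a break; A's dead empty-list fallback disappears.
import Mathlib
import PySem

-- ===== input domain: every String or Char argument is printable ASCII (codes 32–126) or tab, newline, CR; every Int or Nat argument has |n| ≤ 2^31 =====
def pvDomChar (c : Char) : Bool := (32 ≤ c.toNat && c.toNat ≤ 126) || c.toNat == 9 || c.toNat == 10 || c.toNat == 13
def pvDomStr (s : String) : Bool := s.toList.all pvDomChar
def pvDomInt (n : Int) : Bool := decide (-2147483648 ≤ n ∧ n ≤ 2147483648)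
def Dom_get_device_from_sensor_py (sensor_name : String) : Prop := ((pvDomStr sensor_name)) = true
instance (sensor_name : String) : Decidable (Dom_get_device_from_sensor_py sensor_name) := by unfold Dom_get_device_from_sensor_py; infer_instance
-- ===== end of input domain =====

-- B streams over the characters with a token buffer instead of splitting first; objective: alternative.

-- shared primitive helpers (both Pythons call str.capitalize() and f"{int(p):02d}")
-- Python str.capitalize() on a char list: first char uppercased, rest lowercased (exact on the ASCII domain)
def capChars (cs : List Char) : List Char :=
  match cs with
  | [] => []
  | c :: rest => PySem.Chars.upperChar c :: rest.map PySem.Chars.lowerChar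

-- f"{int(p):02d}" for an all-digit token; int(p) ≥ 0 never raises there, so the getD 0
-- default is never taken, and %02d = zfill 2 for a nonnegative value
def fmtChars (t : List Char) : String :=
  PySem.Str.zfill (PySem.Int.toStr ((PySem.Int.ofChars? t).getD 0)) 2

-- ===== PORT A =====
-- the for-loop with break, state = (i, remaining parts), producing the appended pieces
def aLoop (i : Nat) (parts : List String) : List String :=
  match parts with
  | [] => []
  | p :: rest =>
    if i = 0 then String.ofList (capChars p.toList) :: aLoop (i + 1) rest
    else if PySem.Str.strIsdigit p then [fmtChars p.toList]
    else String.ofList (capChars p.toList) :: aLoop (i + 1) rest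

def get_device_from_sensor_py (sensor_name : String) : String :=
  let parts := (PySem.Str.split? sensor_name "_").getD []   -- sep "_" ≠ "": never none
  let equipment := aLoop 0 parts
  if equipment.isEmpty then "Device_01" else PySem.Str.join "_" equipment

-- ===== PORT B =====
-- the character loop of Source B: state = (out, tok, idx); '_' flushes the token
-- (early return when idx > 0 and tok.isdigit()), any other char extends the token
def bLoop (cs : List Char) (out : List String) (tok : List Char) (idx : Nat) : List String :=
  match cs with
  | [] => out
  | c :: rest =>
    if c = '_' then
      if 0 < idx ∧ PySem.Chars.strIsdigit tok then out ++ [fmtChars tok]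
      else bLoop rest (out ++ [String.ofList (capChars tok)]) [] (idx + 1)
    else bLoop rest out (tok ++ [c]) idx

def get_device_from_sensor_py_alt (sensor_name : String) : String :=
  PySem.Str.join "_" (bLoop (sensor_name.toList ++ ['_']) [] [] 0)

-- ===== PRECONDITION & SPEC =====
def Spec_get_device_from_sensor_py (sensor_name : String) (out : String) : Prop := out = get_device_from_sensor_py_alt sensor_name
instance (sensor_name : String) (out : String) : Decidable (Spec_get_device_from_sensor_py sensor_name out) := by unfold Spec_get_device_from_sensor_py; infer_instance

-- ===== CLAIM (what is proved, stated in full; the proofs are below) =====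
def Claim_equal_get_device_from_sensor_py : Prop := ∀ (sensor_name : String), Dom_get_device_from_sensor_py sensor_name → Spec_get_device_from_sensor_py sensor_name (get_device_from_sensor_py sensor_name)

-- ===== LEMMAS AND PROOFS =====

-- prepend a prefix to the head token (identity shape on the nonempty lists toks produces)
def consHead (pre : List Char) : List (List Char) → List (List Char)
  | [] => [pre]
  | h :: t => (pre ++ h) :: t

-- clean structural recursion computing split on a single '_' separator
def toks : List Char → List (List Char)
  | [] => [[]]
  | c :: rest => if c = '_' then [] :: toks rest else consHead [c] (toks rest)

theorem toks_ne_nil (cs : List Char) : toks cs ≠ [] := by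
  cases cs with
  | nil => simp [toks]
  | cons c rest =>
    simp only [toks]
    split_ifs
    · simp
    · cases h : toks rest <;> simp [consHead]

theorem consHead_consHead (a b : List Char) (ts : List (List Char)) (h : ts ≠ []) :
    consHead a (consHead b ts) = consHead (a ++ b) ts := by
  cases ts with
  | nil => exact absurd rfl h
  | cons t rest => simp [consHead]

-- PySem's fueled splitOn on separator "_" computes toks
theorem go_spec (fuel : Nat) (l cur : List Char) (acc : List (List Char))
    (hf : l.length < fuel) :
    PySem.Chars.splitOn.go ['_'] fuel l cur acc
      = acc.reverse ++ consHead cur.reverse (toks l) := by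
  induction fuel generalizing l cur acc with
  | zero => omega
  | succ n ih =>
    cases l with
    | nil => simp [PySem.Chars.splitOn.go, toks, consHead]
    | cons c rest =>
      rw [PySem.Chars.splitOn.go]
      by_cases hc : c = '_'
      · subst hc
        rw [if_pos (by simp [List.isPrefixOf])]
        rw [ih _ _ _ (by simpa using Nat.lt_of_succ_lt_succ hf)]
        have hne := toks_ne_nil rest
        cases h : toks rest with
        | nil => exact absurd h hne
        | cons t ts => simp [toks, consHead, h]
      · rw [if_neg (by simp [List.isPrefixOf]; exact fun h => hc h.symm)]
        rw [ih _ _ _ (by simpa using Nat.lt_of_succ_lt_succ hf)]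
        rw [show (c :: cur).reverse = cur.reverse ++ [c] by simp]
        rw [show toks (c :: rest) = consHead [c] (toks rest) from by simp [toks, hc]]
        rw [consHead_consHead _ _ _ (toks_ne_nil rest)]

theorem splitOn_eq_toks (cs : List Char) :
    PySem.Chars.splitOn cs ['_'] = toks cs := by
  rw [PySem.Chars.splitOn, go_spec _ _ _ _ (by omega)]
  simp [consHead]
  cases h : toks cs with
  | nil => exact absurd h (toks_ne_nil cs)
  | cons t ts => simp [consHead]

-- the flush sequence: what both programs emit for a token list starting at index idx
def flushAll (ts : List (List Char)) (idx : Nat) : List String :=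
  match ts with
  | [] => []
  | t :: rest =>
    if 0 < idx ∧ PySem.Chars.strIsdigit t then [fmtChars t]
    else String.ofList (capChars t) :: flushAll rest (idx + 1)

-- A's loop over the split parts is the flush sequence of the char tokens
theorem aLoop_eq_flushAll (ts : List (List Char)) (i : Nat) :
    aLoop i (ts.map String.ofList) = flushAll ts i := by
  induction ts generalizing i with
  | nil => simp [aLoop, flushAll]
  | cons t rest ih =>
    simp only [List.map_cons, aLoop, flushAll, PySem.Str.strIsdigit,
      String.toList_ofList]
    by_cases hi : i = 0
    · subst hi; simp [ih]
    · rw [if_neg hi]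
      by_cases hd : PySem.Chars.strIsdigit t = true
      · simp [hd, show 0 < i by omega]
      · rw [Bool.not_eq_true] at hd
        rw [if_neg (by simp [hd]), hd]
        rw [ih]
        simp

-- B's char loop, run to the sentinel, emits out ++ the flush sequence of the tokens
theorem bLoop_eq_flushAll (cs : List Char) (out : List String) (tok : List Char)
    (idx : Nat) :
    bLoop (cs ++ ['_']) out tok idx = out ++ flushAll (consHead tok (toks cs)) idx := by
  induction cs generalizing out tok idx with
  | nil =>
    simp only [List.nil_append, toks, consHead, List.append_nil]
    by_cases h : 0 < idx ∧ PySem.Chars.strIsdigit tok = true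
    · simp [bLoop, flushAll, h]
    · simp [bLoop, flushAll, h]
  | cons c rest ih =>
    by_cases hc : c = '_'
    · subst hc
      simp only [List.cons_append, toks, consHead]
      by_cases h : 0 < idx ∧ PySem.Chars.strIsdigit tok = true
      · simp [bLoop, flushAll, h]
      · simp only [bLoop, if_neg h]
        rw [ih]
        have hne := toks_ne_nil rest
        cases ht : toks rest with
        | nil => exact absurd ht hne
        | cons t ts => simp [consHead, flushAll, h]
    · simp only [List.cons_append, bLoop, if_neg hc]
      rw [ih, show toks (c :: rest) = consHead [c] (toks rest) by simp [toks, hc]]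
      rw [consHead_consHead _ _ _ (toks_ne_nil rest)]

theorem flushAll_ne_nil_zero (ts : List (List Char)) (h : ts ≠ []) :
    flushAll ts 0 ≠ [] := by
  cases ts with
  | nil => exact absurd rfl h
  | cons t rest => simp [flushAll]

theorem get_device_eq (s : String) :
    get_device_from_sensor_py s = get_device_from_sensor_py_alt s := by
  unfold get_device_from_sensor_py get_device_from_sensor_py_alt
  have hsplit : (PySem.Str.split? s "_").getD [] = (toks s.toList).map String.ofList := by
    simp [PySem.Str.split?, PySem.Chars.split?, show ("_" : String).toList = ['_'] from rfl,
      splitOn_eq_toks]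
  rw [hsplit]
  simp only [aLoop_eq_flushAll, bLoop_eq_flushAll]
  have h0 : consHead [] (toks s.toList) = toks s.toList := by
    cases h : toks s.toList with
    | nil => exact absurd h (toks_ne_nil _)
    | cons t ts => simp [consHead]
  rw [h0]
  rw [if_neg (by simpa using flushAll_ne_nil_zero _ (toks_ne_nil s.toList))]
  simp

-- ===== VERDICT (by name: the statement is the Claim_ definition above) =====
theorem get_device_from_sensor_py_spec : Claim_equal_get_device_from_sensor_py := by
  intro s _
  unfold Spec_get_device_from_sensor_py
  exact get_device_eq s
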